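-- pv_equiv track=rewrite | github.com/aho4ahoaho/discord-join-notice | run.py | format_track
-- ===== SOURCE A (Python) =====
-- def format_track(track_list: list[str]) -> list[str]:
--     context_lines = []
--     # 2列で表示
--     for i in range(0, len(track_list), 2):
--         t1 = track_list[i][:20] #+("i"*max(0, 20-len(track_list[i])))
--         if i+1 < len(track_list):
--             t2 = track_list[i+1][:20]
--             context_lines.append("{}\t\t{}\n".format(t1, t2))
--         else:
--             context_lines.append("{}\t\t\n".format(t1))
--
--     # 2000文字で分割
--     context = []
--     index = 0
--     count = 0
--     for i in range(len(context_lines)):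
--         count += len(context_lines[i])
--         if count > 2000:
--             context.append("".join(context_lines[index:i]))
--             index = i
--             count = len(context_lines[i])
--     context.append("".join(context_lines[index:]))
--     return context
-- ===== SOURCE B (Python) =====
-- def format_track(track_list: list[str]) -> list[str]:
--     # One fused pass: consume the tracks two at a time from the front while
--     # maintaining the current chunk and its running character count.
--     chunks = []
--     cur = []
--     count = 0
--     it = iter(track_list)
--     for t in it:
--         t2 = next(it, None)
--         if t2 is not None:
--             line = "{}\t\t{}\n".format(t[:20], t2[:20])
--         else:
--             line = "{}\t\t\n".format(t[:20])
--         count += len(line)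
--         if count > 2000:
--             chunks.append("".join(cur))
--             cur = []
--             count = len(line)
--         cur.append(line)
--     chunks.append("".join(cur))
--     return chunks
-- ===== Notes on version B (the rewrite author's own statement) =====
-- stated objective: alternative
-- what changed: Replaces A's two passes (build all lines by index with step-2 range, then re-scan them by index with slice-and-join chunking) by a single structural pass that consumes the track list two elements at a time from the front while maintaining the current chunk list and running character count.
import Mathlib
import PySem

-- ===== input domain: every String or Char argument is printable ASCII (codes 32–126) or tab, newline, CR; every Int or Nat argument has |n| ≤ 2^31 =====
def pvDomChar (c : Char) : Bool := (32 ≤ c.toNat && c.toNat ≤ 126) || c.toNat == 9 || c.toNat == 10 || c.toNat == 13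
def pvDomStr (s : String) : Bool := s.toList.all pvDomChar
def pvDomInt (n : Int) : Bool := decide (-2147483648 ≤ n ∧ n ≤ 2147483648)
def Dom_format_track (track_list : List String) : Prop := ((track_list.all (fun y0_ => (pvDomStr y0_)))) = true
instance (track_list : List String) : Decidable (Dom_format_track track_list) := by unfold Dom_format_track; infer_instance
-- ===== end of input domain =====

-- B fuses A's two index-based passes into one structural pass over the list; same output (objective: alternative).

-- ===== PORT A =====
def format_track (track_list : List String) : List String :=
  let n : Int := PySem.List.len track_list
  let context_lines : List String :=
    (PySem.List.pyRange 0 n 2).foldl (fun acc i =>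
      let t1 := PySem.Str.slice (PySem.List.pyGetD track_list i "") none (some 20)
      if i + 1 < n then
        let t2 := PySem.Str.slice (PySem.List.pyGetD track_list (i + 1) "") none (some 20)
        acc ++ [t1 ++ "\t\t" ++ t2 ++ "\n"]
      else
        acc ++ [t1 ++ "\t\t" ++ "\n"]) []
  let st :=
    (PySem.List.pyRange 0 (PySem.List.len context_lines) 1).foldl
      (fun (st : List String × Int × Int) i =>
        let context := st.1
        let index := st.2.1
        let count := st.2.2 + PySem.Str.len (PySem.List.pyGetD context_lines i "")
        if count > 2000 then
          (context ++ [PySem.Str.join "" (PySem.List.slice context_lines (some index) (some i))],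
           i, PySem.Str.len (PySem.List.pyGetD context_lines i ""))
        else
          (context, index, count))
      ([], 0, 0)
  st.1 ++ [PySem.Str.join "" (PySem.List.slice context_lines (some st.2.1) none)]

-- ===== PORT B =====
-- the fused while-loop of Source B: state (chunks, cur, count), consuming the list from the front
def ftGo : List String → List String → List String → Int → List String
  | [], chunks, cur, _ => chunks ++ [PySem.Str.join "" cur]
  | a :: rest, chunks, cur, count =>
    match rest with
    | b :: rest' =>
      let line := PySem.Str.slice a none (some 20) ++ "\t\t" ++ PySem.Str.slice b none (some 20) ++ "\n"
      let count := count + PySem.Str.len line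
      if count > 2000 then ftGo rest' (chunks ++ [PySem.Str.join "" cur]) [line] (PySem.Str.len line)
      else ftGo rest' chunks (cur ++ [line]) count
    | [] =>
      let line := PySem.Str.slice a none (some 20) ++ "\t\t" ++ "\n"
      let count := count + PySem.Str.len line
      if count > 2000 then ftGo [] (chunks ++ [PySem.Str.join "" cur]) [line] (PySem.Str.len line)
      else ftGo [] chunks (cur ++ [line]) count

def format_track_alt (track_list : List String) : List String :=
  ftGo track_list [] [] 0

-- ===== PRECONDITION & SPEC =====
def Spec_format_track (track_list : List String) (out : List String) : Prop := out = format_track_alt track_list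
instance (track_list : List String) (out : List String) : Decidable (Spec_format_track track_list out) := by unfold Spec_format_track; infer_instance

-- ===== CLAIM (what is proved, stated in full; the proofs are below) =====
def Claim_equal_format_track : Prop := ∀ (track_list : List String), Dom_format_track track_list → Spec_format_track track_list (format_track track_list)

-- ===== LEMMAS AND PROOFS =====

-- the list of formatted lines, built structurally two tracks at a time (proof-side characterisation)
def ftLines : List String → List String
  | [] => []
  | [a] => [PySem.Str.slice a none (some 20) ++ "\t\t" ++ "\n"]
  | a :: b :: rest =>
    (PySem.Str.slice a none (some 20) ++ "\t\t" ++ PySem.Str.slice b none (some 20) ++ "\n") :: ftLines rest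

-- B's chunking loop, abstracted over an already-built line list
def splitGo : List String → List String → List String → Int → List String
  | [], chunks, cur, _ => chunks ++ [PySem.Str.join "" cur]
  | l :: rest, chunks, cur, count =>
    let count := count + PySem.Str.len l
    if count > 2000 then splitGo rest (chunks ++ [PySem.Str.join "" cur]) [l] (PySem.Str.len l)
    else splitGo rest chunks (cur ++ [l]) count

-- A's first pass, as a function (definitionally the first let of format_track)
def phase1expr (xs : List String) : List String :=
  (PySem.List.pyRange 0 (PySem.List.len xs) 2).foldl (fun acc i =>
    let t1 := PySem.Str.slice (PySem.List.pyGetD xs i "") none (some 20)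
    if i + 1 < PySem.List.len xs then
      let t2 := PySem.Str.slice (PySem.List.pyGetD xs (i + 1) "") none (some 20)
      acc ++ [t1 ++ "\t\t" ++ t2 ++ "\n"]
    else
      acc ++ [t1 ++ "\t\t" ++ "\n"]) []

-- A's second pass, as a function (definitionally the rest of format_track)
def ftF (ls : List String) (st : List String × Int × Int) (i : Int) : List String × Int × Int :=
  let context := st.1
  let index := st.2.1
  let count := st.2.2 + PySem.Str.len (PySem.List.pyGetD ls i "")
  if count > 2000 then
    (context ++ [PySem.Str.join "" (PySem.List.slice ls (some index) (some i))],
     i, PySem.Str.len (PySem.List.pyGetD ls i ""))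
  else
    (context, index, count)

def phase2expr (ls : List String) : List String :=
  let st := (PySem.List.pyRange 0 (PySem.List.len ls) 1).foldl (ftF ls) ([], 0, 0)
  st.1 ++ [PySem.Str.join "" (PySem.List.slice ls (some st.2.1) none)]

theorem ftGo_eq_splitGo (xs : List String) : ∀ chunks cur count,
    ftGo xs chunks cur count = splitGo (ftLines xs) chunks cur count := by
  induction xs using ftLines.induct with
  | case1 => intro chunks cur count; rfl
  | case2 a => intro chunks cur count; simp only [ftGo, ftLines, splitGo]
  | case3 a b rest ih =>
    intro chunks cur count
    simp only [ftGo, ftLines, splitGo]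
    split_ifs <;> exact ih _ _ _

def p1F (xs : List String) (acc : List String) (i : Int) : List String :=
  let t1 := PySem.Str.slice (PySem.List.pyGetD xs i "") none (some 20)
  if i + 1 < PySem.List.len xs then
    let t2 := PySem.Str.slice (PySem.List.pyGetD xs (i + 1) "") none (some 20)
    acc ++ [t1 ++ "\t\t" ++ t2 ++ "\n"]
  else
    acc ++ [t1 ++ "\t\t" ++ "\n"]

theorem range2_cons (m : Nat) :
    PySem.List.pyRange 0 ((m : Int) + 2) 2 = 0 :: (PySem.List.pyRange 0 (m : Int) 2).map (· + 2) := by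
  rw [PySem.List.pyRange_of_pos 0 ((m : Int) + 2) (by norm_num),
      PySem.List.pyRange_of_pos 0 (m : Int) (by norm_num)]
  have hc : (if (0:Int) < (m:Int) + 2 then (((m:Int) + 2 - 0 + 2 - 1)/2).toNat else 0)
      = (if (0:Int) < (m:Int) then (((m:Int) - 0 + 2 - 1)/2).toNat else 0) + 1 := by
    split_ifs <;> omega
  rw [hc, List.range_succ_eq_map, List.map_cons, List.map_map, List.map_map]
  refine congrArg₂ _ (by norm_num) (List.map_congr_left ?_)
  intro k _
  simp [Function.comp]
  ring

theorem pyGetD_cons2 (a b : String) (rest : List String) (i : Int) (h : 0 ≤ i) :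
    PySem.List.pyGetD (a :: b :: rest) (i + 2) "" = PySem.List.pyGetD rest i "" := by
  rw [PySem.List.pyGetD_of_nonneg _ _ (by omega), PySem.List.pyGetD_of_nonneg _ _ h]
  have h2 : (i + 2).toNat = i.toNat + 2 := by omega
  rw [h2]
  simp [List.getD]

theorem phase1_aux (xs : List String) : ∀ acc,
    (PySem.List.pyRange 0 (PySem.List.len xs) 2).foldl (p1F xs) acc = acc ++ ftLines xs := by
  induction xs using ftLines.induct with
  | case1 =>
    intro acc
    have h : PySem.List.pyRange 0 (PySem.List.len ([] : List String)) 2 = [] := by decide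
    rw [h]; simp [ftLines]
  | case2 a =>
    intro acc
    have h : PySem.List.pyRange 0 (PySem.List.len [a]) 2 = [0] := by
      simp [PySem.List.len_eq]; decide
    rw [h]
    simp [p1F, ftLines, PySem.List.pyGetD, PySem.List.pyGet?, PySem.List.pyIdx?]
  | case3 a b rest ih =>
    intro acc
    have hlen : PySem.List.len (a :: b :: rest) = (rest.length : Int) + 2 := by
      simp [PySem.List.len_eq]; ring
    have hcong : ∀ (acc' : List String), ∀ i ∈ PySem.List.pyRange 0 (rest.length : Int) 2,
        p1F (a :: b :: rest) acc' (i + 2) = p1F rest acc' i := by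
      intro acc' i hi
      obtain ⟨h0i, hlt, -⟩ := (PySem.List.mem_pyRange_iff_of_pos (by norm_num) i).1 hi
      simp only [p1F]
      rw [pyGetD_cons2 a b rest i h0i, show (i + 2 + 1 : Int) = (i + 1) + 2 by ring,
          pyGetD_cons2 a b rest (i + 1) (by omega)]
      rw [hlen, PySem.List.len_eq]
      split_ifs with h1 h2 h2
      · rfl
      · omega
      · omega
      · rfl
    have h0 : p1F (a :: b :: rest) acc 0
        = acc ++ [PySem.Str.slice a none (some 20) ++ "\t\t" ++ PySem.Str.slice b none (some 20) ++ "\n"] := by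
      rw [p1F, hlen]
      rw [if_pos (by omega)]
      have hnn : (0:Int) ≤ (rest.length : Int) + 1 := by positivity
      simp [PySem.List.pyGetD, PySem.List.pyGet?, PySem.List.pyIdx?, hnn]
    rw [hlen, range2_cons rest.length]
    simp only [List.foldl_cons, List.foldl_map]
    have ih' : ∀ acc : List String,
        List.foldl (p1F rest) acc (PySem.List.pyRange 0 (rest.length : Int) 2) = acc ++ ftLines rest := by
      intro acc2
      have := ih acc2
      rwa [PySem.List.len_eq] at this
    rw [h0, PySem.List.foldl_congr_mem _ _ (p1F rest) _ hcong, ih']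
    simp [ftLines]

theorem phase1_eq_ftLines (xs : List String) : phase1expr xs = ftLines xs := phase1_aux xs []

theorem phase2_aux (ls : List String) : ∀ (n i : Nat), ls.length = i + n →
    ∀ (context : List String) (index : Nat) (count : Int), index ≤ i →
    ((PySem.List.pyRange (i : Int) (PySem.List.len ls) 1).foldl (ftF ls) (context, (index : Int), count)).1
      ++ [PySem.Str.join "" (PySem.List.slice ls
            (some ((PySem.List.pyRange (i : Int) (PySem.List.len ls) 1).foldl (ftF ls) (context, (index : Int), count)).2.1) none)]
    = splitGo (ls.drop i) context ((ls.drop index).take (i - index)) count := by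
  intro n
  induction n with
  | zero =>
    intro i hlen context index count hidx
    have hi : i = ls.length := by omega
    have hr : PySem.List.pyRange (i : Int) (PySem.List.len ls) 1 = [] := by
      apply PySem.List.pyRange_one_eq_nil
      rw [PySem.List.len_eq]; omega
    rw [hr]
    simp only [List.foldl_nil]
    rw [PySem.List.slice_from_natCast]
    rw [hi, List.drop_length, List.take_of_length_le (by simp)]
    rfl
  | succ n ihn =>
    intro i hlen context index count hidx
    have hilt : i < ls.length := by omega
    have hget : PySem.List.pyGetD ls (i : Int) "" = ls[i] := by
      rw [PySem.List.pyGetD_eq_getElem ls "" (by positivity) (by exact_mod_cast hilt)]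
      simp
    have hr : PySem.List.pyRange (i : Int) (PySem.List.len ls) 1
        = (i : Int) :: PySem.List.pyRange ((i : Int) + 1) (PySem.List.len ls) 1 := by
      apply PySem.List.pyRange_one_cons
      rw [PySem.List.len_eq]; exact_mod_cast hilt
    have hdrop : ls.drop i = ls[i] :: ls.drop (i + 1) := (List.getElem_cons_drop hilt).symm
    have hcast : ((i : Int) + 1) = ((i + 1 : Nat) : Int) := by push_cast; ring
    rw [hr]
    simp only [List.foldl_cons]
    by_cases hc : count + PySem.Str.len ls[i] > 2000
    · have hstep : ftF ls (context, (index : Int), count) (i : Int)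
          = (context ++ [PySem.Str.join "" ((ls.drop index).take (i - index))], (i : Int), PySem.Str.len ls[i]) := by
        simp only [ftF, hget]
        rw [if_pos hc, PySem.List.slice_natCast]
      rw [hstep, hcast, ihn (i + 1) (by omega) (context ++ [PySem.Str.join "" ((ls.drop index).take (i - index))]) i (PySem.Str.len ls[i]) (by omega)]
      rw [hdrop]
      simp only [splitGo]
      rw [if_pos hc]
      congr 1
      rw [show i + 1 - i = 1 from by omega]
      rfl
    · have hstep : ftF ls (context, (index : Int), count) (i : Int)
          = (context, (index : Int), count + PySem.Str.len ls[i]) := by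
        simp only [ftF, hget]
        rw [if_neg hc]
      rw [hstep, hcast, ihn (i + 1) (by omega) context index (count + PySem.Str.len ls[i]) (by omega)]
      rw [hdrop]
      simp only [splitGo]
      rw [if_neg hc]
      congr 1
      have h1 : i + 1 - index = (i - index) + 1 := by omega
      rw [h1, List.take_add_one]
      have h2 : (ls.drop index)[i - index]? = some ls[i] := by
        rw [List.getElem?_drop, show index + (i - index) = i from by omega,
            List.getElem?_eq_getElem hilt]
      rw [h2]
      rfl

theorem phase2_eq_splitGo (ls : List String) : phase2expr ls = splitGo ls [] [] 0 := by
  have := phase2_aux ls ls.length 0 (by omega) [] 0 0 (by omega)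
  simpa [phase2expr] using this

-- ===== VERDICT (by name: the statement is the Claim_ definition above) =====
theorem format_track_spec : Claim_equal_format_track := by
  intro tl _
  show format_track tl = format_track_alt tl
  calc format_track tl = phase2expr (phase1expr tl) := rfl
    _ = phase2expr (ftLines tl) := by rw [phase1_eq_ftLines tl]
    _ = splitGo (ftLines tl) [] [] 0 := phase2_eq_splitGo _
    _ = ftGo tl [] [] 0 := (ftGo_eq_splitGo tl [] [] 0).symm
    _ = format_track_alt tl := rfl
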